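-- pv_equiv track=rewrite | github.com/aww/adventofcode | 2023/day18_lavaduct_lagoon.py | is_closed
-- ===== SOURCE A (Python) =====
-- def is_closed(plan):
--     """Is the curve defined in the dig plan closed?"""
--     vsum, hsum = 0, 0
--     for a, b in plan:
--         if a == 0:
--             hsum += b
--         elif a == 1:
--             vsum += b
--         elif a == 2:
--             hsum -= b
--         elif a == 3:
--             vsum -= b
--         else:
--             ValueError(f"Unrecognized direction '{a}' in dig plan")
--     return (vsum == 0) and (hsum == 0)
-- ===== SOURCE B (Python) =====
-- def is_closed(plan):
--     """Is the curve defined in the dig plan closed?"""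
--     def total(d):
--         return sum(b for a, b in plan if a == d)
--     return total(0) == total(2) and total(1) == total(3)
-- ===== Notes on version B (the rewrite author's own statement) =====
-- stated objective: alternative
-- what changed: Instead of accumulating signed net displacements in one pass, B makes four filtered summing passes (total distance per direction code) and declares the curve closed iff the rightward total equals the leftward total and the upward total equals the downward total; unrecognized codes fall into no bucket, matching A's dead else-branch.
import Mathlib
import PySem

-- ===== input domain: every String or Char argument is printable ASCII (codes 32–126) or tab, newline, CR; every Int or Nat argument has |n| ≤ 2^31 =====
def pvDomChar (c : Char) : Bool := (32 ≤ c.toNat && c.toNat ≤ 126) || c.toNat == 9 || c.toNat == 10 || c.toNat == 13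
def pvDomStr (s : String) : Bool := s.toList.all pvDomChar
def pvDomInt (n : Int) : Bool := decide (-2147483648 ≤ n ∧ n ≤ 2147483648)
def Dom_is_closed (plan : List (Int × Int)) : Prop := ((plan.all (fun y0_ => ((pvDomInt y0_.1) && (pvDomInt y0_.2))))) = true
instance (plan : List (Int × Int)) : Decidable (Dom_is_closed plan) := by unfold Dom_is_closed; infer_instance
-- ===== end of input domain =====

-- B replaces A's single accumulation pass over two signed scalars by four filtered
-- per-direction total-distance passes, comparing opposite totals (alternative decomposition).


-- ===== PORT A =====
def is_closed (plan : List (Int × Int)) : Bool :=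
  let vh := plan.foldl (fun (s : Int × Int) (p : Int × Int) =>
    let (vsum, hsum) := s
    let (a, b) := p
    if a = 0 then (vsum, hsum + b)
    else if a = 1 then (vsum + b, hsum)
    else if a = 2 then (vsum, hsum - b)
    else if a = 3 then (vsum - b, hsum)
    else (vsum, hsum)) (0, 0)
  (vh.1 = 0) && (vh.2 = 0)

-- ===== PORT B =====
-- total distance recorded for direction code d (sum of a filtered comprehension)
def totalDir (plan : List (Int × Int)) (d : Int) : Int :=
  ((plan.filter (fun p => p.1 == d)).map Prod.snd).sum

def is_closed_alt (plan : List (Int × Int)) : Bool :=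
  (totalDir plan 0 = totalDir plan 2) && (totalDir plan 1 = totalDir plan 3)

-- ===== PRECONDITION & SPEC =====
def Spec_is_closed (plan : List (Int × Int)) (out : Bool) : Prop := out = is_closed_alt plan
instance (plan : List (Int × Int)) (out : Bool) : Decidable (Spec_is_closed plan out) := by unfold Spec_is_closed; infer_instance

-- ===== CLAIM (what is proved, stated in full; the proofs are below) =====
def Claim_equal_is_closed : Prop := ∀ (plan : List (Int × Int)), Dom_is_closed plan → Spec_is_closed plan (is_closed plan)

-- ===== LEMMAS AND PROOFS =====

-- A's fold from state (v, h) lands at (v + t1 - t3, h + t0 - t2)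
theorem foldA_totals (plan : List (Int × Int)) (v h : Int) :
    plan.foldl (fun (s : Int × Int) (p : Int × Int) =>
      let (vsum, hsum) := s
      let (a, b) := p
      if a = 0 then (vsum, hsum + b)
      else if a = 1 then (vsum + b, hsum)
      else if a = 2 then (vsum, hsum - b)
      else if a = 3 then (vsum - b, hsum)
      else (vsum, hsum)) (v, h)
    = (v + totalDir plan 1 - totalDir plan 3, h + totalDir plan 0 - totalDir plan 2) := by
  induction plan generalizing v h with
  | nil => simp [totalDir]
  | cons p rest ih =>
    obtain ⟨a, b⟩ := p
    simp only [List.foldl_cons]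
    by_cases h0 : a = 0
    · subst h0; norm_num; rw [ih]
      simp [totalDir]; ring
    by_cases h1 : a = 1
    · subst h1; norm_num; rw [ih]
      simp [totalDir]; ring
    by_cases h2 : a = 2
    · subst h2; norm_num; rw [ih]
      simp [totalDir]; ring
    by_cases h3 : a = 3
    · subst h3; norm_num; rw [ih]
      simp [totalDir]; ring
    · simp only [if_neg h0, if_neg h1, if_neg h2, if_neg h3]; rw [ih]
      simp [totalDir, h0, h1, h2, h3]

-- ===== VERDICT (by name: the statement is the Claim_ definition above) =====
theorem is_closed_spec : Claim_equal_is_closed := by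
  intro plan _
  unfold Spec_is_closed is_closed is_closed_alt
  rw [foldA_totals]
  simp only [zero_add]
  by_cases e1 : totalDir plan 1 = totalDir plan 3 <;>
    by_cases e0 : totalDir plan 0 = totalDir plan 2 <;>
      simp [e0, e1, sub_eq_zero]
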